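-- pv_equiv track=rewrite | github.com/chuanbanjun/algorithm | tencent 9.2-2.py | iscontinuity
-- ===== SOURCE A (Python) =====
-- def iscontinuity(lis, k, l):
--     if len(lis) == 0 or len(lis) != l:
--         return False
--     index_lis = [i for i, x in enumerate(lis) if x == 'w']
--     if len(index_lis) % k != 0:
--         return False
--     w_str = ''.join(['w'] * k)
--     all_str = ''.join(lis)
--     if all_str.count(w_str) * k == len(index_lis):
--         return True
--     else:
--         return False
-- ===== SOURCE B (Python) =====
-- def iscontinuity(lis, k, l):
--     if len(lis) == 0 or len(lis) != l:
--         return False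
--     if k <= 0:
--         # runs of non-positive length never match anything; A returns False for
--         # every negative k too (and raises for k == 0, which is outside Pre_)
--         return False
--     total = 0
--     for x in lis:
--         if x == 'w':
--             total += 1
--     if total % k != 0:
--         return False
--     matched = 0
--     run = 0
--     for ch in ''.join(lis):
--         if ch == 'w':
--             run += 1
--         else:
--             matched += (run // k) * k
--             run = 0
--     matched += (run // k) * k
--     return matched == total
-- ===== Notes on version B (the rewrite author's own statement) =====
-- stated objective: simpler
-- what changed: B replaces A's index-list build plus substring counting of 'w'*k in the joined string by a single character scan that accumulates maximal 'w'-run lengths and sums (run//k)*k, with an early False for k<=0 (A always returns False for negative k).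
import Mathlib
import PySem

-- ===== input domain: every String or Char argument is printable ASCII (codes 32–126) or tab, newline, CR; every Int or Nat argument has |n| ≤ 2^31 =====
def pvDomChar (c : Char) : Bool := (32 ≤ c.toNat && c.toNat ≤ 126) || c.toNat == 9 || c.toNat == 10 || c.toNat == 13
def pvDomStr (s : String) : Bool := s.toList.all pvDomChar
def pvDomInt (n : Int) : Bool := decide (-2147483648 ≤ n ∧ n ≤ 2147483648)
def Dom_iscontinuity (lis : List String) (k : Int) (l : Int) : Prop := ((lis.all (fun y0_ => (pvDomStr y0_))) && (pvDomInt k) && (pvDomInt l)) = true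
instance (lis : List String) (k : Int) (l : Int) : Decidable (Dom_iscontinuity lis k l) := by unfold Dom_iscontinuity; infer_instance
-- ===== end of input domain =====

-- B replaces A's index-list + substring-count of 'w'*k by one character scan summing (run//k)*k
-- over maximal 'w'-runs (objective: simpler; return values proved equal on Pre_).

-- ===== PORT A =====
def iscontinuity (lis : List String) (k : Int) (l : Int) : Bool :=
  if lis.length = 0 ∨ (lis.length : Int) ≠ l then false
  else
    -- index_lis = [i for i, x in enumerate(lis) if x == 'w']
    let index_lis := (PySem.List.enumerate lis 0).filterMap
      (fun p => if p.2 == "w" then some p.1 else none)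
    if PySem.Int.mod (index_lis.length : Int) k ≠ 0 then false
    else
      -- w_str = ''.join(['w'] * k)  (empty for k ≤ 0, exactly as Python's list*int)
      let w_str := List.replicate k.toNat 'w'
      -- all_str = ''.join(lis)  (kept at the List Char level, as PYSEM.md directs)
      let all_str := PySem.Chars.join [] (lis.map String.toList)
      if ((PySem.Chars.count all_str w_str : Int) * k = (index_lis.length : Int)) then true
      else false

-- ===== PORT B =====
def iscontinuity_alt (lis : List String) (k : Int) (l : Int) : Bool :=
  if lis.length = 0 ∨ (lis.length : Int) ≠ l then false
  else if k ≤ 0 then false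
  else
    let total := lis.foldl (fun t x => if x == "w" then t + 1 else t) (0 : Int)
    if PySem.Int.mod total k ≠ 0 then false
    else
      let p := (PySem.Chars.join [] (lis.map String.toList)).foldl
        (fun (s : Int × Int) c =>
          if c == 'w' then (s.1, s.2 + 1)
          else (s.1 + PySem.Int.floordiv s.2 k * k, 0)) ((0 : Int), (0 : Int))
      decide (p.1 + PySem.Int.floordiv p.2 k * k = total)

-- ===== PRECONDITION & SPEC =====
-- Pre_ excludes only the inputs where A raises ZeroDivisionError: both length guards pass and k = 0.
def Pre_iscontinuity (lis : List String) (k : Int) (l : Int) : Prop :=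
  lis.length = 0 ∨ (lis.length : Int) ≠ l ∨ k ≠ 0
instance (lis : List String) (k : Int) (l : Int) : Decidable (Pre_iscontinuity lis k l) := by
  unfold Pre_iscontinuity; infer_instance

def pvWitness_iscontinuity : List String × Int × Int := (["w", "a", "w"], 1, 3)

def Spec_iscontinuity (lis : List String) (k : Int) (l : Int) (out : Bool) : Prop := out = iscontinuity_alt lis k l
instance (lis : List String) (k : Int) (l : Int) (out : Bool) : Decidable (Spec_iscontinuity lis k l out) := by unfold Spec_iscontinuity; infer_instance

-- ===== CLAIM (what is proved, stated in full; the proofs are below) =====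
def Claim_equal_iscontinuity : Prop := ∀ (lis : List String) (k : Int) (l : Int), Dom_iscontinuity lis k l → Pre_iscontinuity lis k l → Spec_iscontinuity lis k l (iscontinuity lis k l)


-- ===== LEMMAS AND PROOFS =====

-- length of the leading run of 'w' characters
def leadRun : List Char → Nat
  | [] => 0
  | c :: t => if c = 'w' then leadRun t + 1 else 0

-- total matched length: pending run r, then sum over maximal 'w'-runs of (run/K)
def runsCount (K : Nat) : Nat → List Char → Nat
  | r, [] => r / K
  | r, c :: t => if c = 'w' then runsCount K (r + 1) t else r / K + runsCount K 0 t

theorem pv_prefix_iff (K : Nat) (cs : List Char) :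
    (List.replicate K 'w').isPrefixOf cs = true ↔ K ≤ leadRun cs := by
  induction K generalizing cs with
  | zero => simp [List.isPrefixOf]
  | succ K ih =>
    cases cs with
    | nil => simp [List.replicate_succ, List.isPrefixOf, leadRun]
    | cons c t =>
      by_cases hc : c = 'w'
      · subst hc
        simp [List.replicate_succ, List.isPrefixOf, leadRun, ih]
      · simp [List.replicate_succ, List.isPrefixOf, leadRun, hc, Ne.symm hc]

theorem runsCount_nil (K r : Nat) : runsCount K r [] = r / K := rfl
theorem runsCount_w (K r : Nat) (t : List Char) :
    runsCount K r ('w' :: t) = runsCount K (r + 1) t := by simp [runsCount]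
theorem runsCount_not (K r : Nat) (c : Char) (t : List Char) (hc : c ≠ 'w') :
    runsCount K r (c :: t) = r / K + runsCount K 0 t := by simp [runsCount, hc]

theorem pv_runs_absorb (K : Nat) (j : Nat) :
    ∀ (r : Nat) (rest : List Char),
      runsCount K r (List.replicate j 'w' ++ rest) = runsCount K (r + j) rest := by
  induction j with
  | zero => intro r rest; simp
  | succ j ih =>
    intro r rest
    simp only [List.replicate_succ, List.cons_append, runsCount_w, ih]
    congr 1
    omega

theorem pv_runs_plusK (K : Nat) (hK : 0 < K) :
    ∀ (cs : List Char) (r : Nat), runsCount K (r + K) cs = runsCount K r cs + 1 := by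
  intro cs
  induction cs with
  | nil => intro r; simp [runsCount_nil, Nat.add_div_right r hK]
  | cons c t ih =>
    intro r
    by_cases hc : c = 'w'
    · subst hc
      rw [runsCount_w, runsCount_w, show r + K + 1 = (r + 1) + K by ring, ih]
    · rw [runsCount_not K _ c t hc, runsCount_not K _ c t hc, Nat.add_div_right r hK]
      omega

theorem pv_runs_shift (K : Nat) :
    ∀ (t : List Char) (r r' : Nat), r ≤ r' → r' + leadRun t < K →
      runsCount K r' t = runsCount K r t := by
  intro t
  induction t with
  | nil =>
    intro r r' hle hlt
    simp only [leadRun, Nat.add_zero] at hlt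
    simp [runsCount_nil, Nat.div_eq_of_lt hlt, Nat.div_eq_of_lt (lt_of_le_of_lt hle hlt)]
  | cons c t ih =>
    intro r r' hle hlt
    by_cases hc : c = 'w'
    · subst hc
      simp [leadRun] at hlt
      rw [runsCount_w, runsCount_w]
      exact ih (r + 1) (r' + 1) (by omega) (by omega)
    · simp only [leadRun, if_neg hc, Nat.add_zero] at hlt
      rw [runsCount_not K _ c t hc, runsCount_not K _ c t hc,
        Nat.div_eq_of_lt hlt, Nat.div_eq_of_lt (lt_of_le_of_lt hle hlt)]

theorem pv_go_eq (K : Nat) (hK : 0 < K) :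
    ∀ (fuel : Nat) (cs : List Char) (acc : Nat), cs.length ≤ fuel →
      PySem.Chars.count.go (List.replicate K 'w') fuel cs acc = acc + runsCount K 0 cs := by
  intro fuel
  induction fuel with
  | zero =>
    intro cs acc h
    have hnil : cs = [] := List.eq_nil_of_length_eq_zero (Nat.le_zero.mp h)
    subst hnil
    simp [PySem.Chars.count.go, runsCount_nil]
  | succ f ih =>
    intro cs acc h
    cases cs with
    | nil => simp [PySem.Chars.count.go, runsCount_nil]
    | cons c t =>
      rw [PySem.Chars.count.go]
      by_cases hp : (List.replicate K 'w').isPrefixOf (c :: t) = true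
      · rw [if_pos hp]
        obtain ⟨rest, hrest⟩ := List.isPrefixOf_iff_prefix.mp hp
        have hdrop : List.drop (List.replicate K 'w').length (c :: t) = rest := by
          rw [← hrest, List.drop_left]
        have hlen : K + rest.length = (c :: t).length := by
          rw [← hrest]; simp
        rw [hdrop, ih rest (acc + 1) (by simp only [List.length_cons] at h hlen; omega)]
        rw [← hrest, pv_runs_absorb K K 0 rest]
        have := pv_runs_plusK K hK rest 0
        omega
      · rw [if_neg hp]
        rw [ih t acc (by simp at h; omega)]
        by_cases hc : c = 'w'
        · subst hc
          rw [runsCount_w]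
          have hlr : ¬ K ≤ leadRun ('w' :: t) := fun hle => hp ((pv_prefix_iff K _).mpr hle)
          simp only [leadRun, if_pos rfl] at hlr
          rw [pv_runs_shift K t 0 1 (by omega) (by simp [leadRun] at hlr; omega)]
        · rw [runsCount_not K 0 c t hc, Nat.zero_div, Nat.zero_add]

theorem pv_foldB (K : Nat) :
    ∀ (cs : List Char) (m : Int) (r : Nat),
      (let p := cs.foldl
        (fun (s : Int × Int) c =>
          if c == 'w' then (s.1, s.2 + 1)
          else (s.1 + PySem.Int.floordiv s.2 (K : Int) * (K : Int), 0)) (m, (r : Int));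
       p.1 + PySem.Int.floordiv p.2 (K : Int) * (K : Int))
      = m + ((runsCount K r cs * K : Nat) : Int) := by
  intro cs
  induction cs with
  | nil =>
    intro m r
    simp only [List.foldl_nil, runsCount_nil, PySem.Int.floordiv_natCast]
    push_cast
    ring
  | cons c t ih =>
    intro m r
    by_cases hc : c = 'w'
    · subst hc
      simp only [List.foldl_cons, beq_self_eq_true, if_pos, runsCount_w]
      have : ((r : Int) + 1) = ((r + 1 : Nat) : Int) := by push_cast; ring
      rw [this]
      exact ih m (r + 1)
    · have hbeq : (c == 'w') = false := by simp [hc]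
      simp only [List.foldl_cons, hbeq, Bool.false_eq_true, if_false,
        runsCount_not K r c t hc]
      calc _ = (m + PySem.Int.floordiv (r : Int) (K : Int) * (K : Int))
                + ((runsCount K 0 t * K : Nat) : Int) :=
              ih (m + PySem.Int.floordiv (r : Int) (K : Int) * (K : Int)) 0
        _ = m + (((r / K + runsCount K 0 t) * K : Nat) : Int) := by
              rw [PySem.Int.floordiv_natCast]
              push_cast
              ring

theorem pv_index_len (lis : List String) :
    ∀ (s : Int), ((PySem.List.enumerate lis s).filterMap
      (fun p => if p.2 == "w" then some p.1 else none)).length = lis.count "w" := by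
  induction lis with
  | nil => intro s; simp [PySem.List.enumerate_nil]
  | cons x t ih =>
    intro s
    simp only [beq_iff_eq] at ih
    rw [PySem.List.enumerate_cons, List.filterMap_cons]
    by_cases hx : x = "w"
    · simp [hx, List.count_cons, ih]
    · simp [hx, List.count_cons, ih]

-- ===== VERDICT (by name: the statement is the Claim_ definition above) =====
theorem iscontinuity_spec : Claim_equal_iscontinuity := by
  intro lis k l _ hpre
  unfold Spec_iscontinuity iscontinuity iscontinuity_alt
  by_cases hg : lis.length = 0 ∨ (lis.length : Int) ≠ l
  · rw [if_pos hg, if_pos hg]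
  · rw [if_neg hg, if_neg hg]
    have hk0 : k ≠ 0 := by
      unfold Pre_iscontinuity at hpre; tauto
    have hidx := pv_index_len lis 0
    have htot : lis.foldl (fun t x => if x == "w" then t + 1 else t) (0 : Int)
        = ((lis.count "w" : Nat) : Int) := by
      rw [PySem.List.foldl_beq_add_one]; ring
    rcases lt_trichotomy k 0 with hneg | hz | hpos
    · rw [if_pos (le_of_lt hneg)]
      simp only [hidx]
      by_cases hm : PySem.Int.mod ((lis.count "w" : Nat) : Int) k ≠ 0
      · rw [if_pos hm]
      · rw [if_neg hm]
        have hKz : k.toNat = 0 := Int.toNat_of_nonpos (le_of_lt hneg)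
        rw [hKz]
        have hcount : (PySem.Chars.count (PySem.Chars.join [] (lis.map String.toList))
            (List.replicate 0 'w') : Nat)
            = (PySem.Chars.join [] (lis.map String.toList)).length + 1 := by
          simp [PySem.Chars.count]
        rw [hcount, if_neg]
        intro heq
        have h1 : (((PySem.Chars.join [] (lis.map String.toList)).length + 1 : Nat) : Int) * k < 0 :=
          mul_neg_of_pos_of_neg (by positivity) hneg
        have h2 : (0 : Int) ≤ ((lis.count "w" : Nat) : Int) := Int.natCast_nonneg _
        omega
    · exact absurd hz hk0
    · rw [if_neg (not_le.mpr hpos)]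
      have hkK : k = (k.toNat : Int) := (Int.toNat_of_nonneg hpos.le).symm
      have hK1 : 0 < k.toNat := by omega
      simp only [hidx, htot]
      by_cases hm : PySem.Int.mod ((lis.count "w" : Nat) : Int) k ≠ 0
      · rw [if_pos hm, if_pos hm]
      · rw [if_neg hm, if_neg hm]
        have hcnt : (PySem.Chars.count (PySem.Chars.join [] (lis.map String.toList))
            (List.replicate k.toNat 'w') : Nat)
            = runsCount k.toNat 0 (PySem.Chars.join [] (lis.map String.toList)) := by
          unfold PySem.Chars.count
          rw [if_neg (by simp [List.replicate_eq_nil_iff]; omega)]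
          rw [pv_go_eq k.toNat hK1 _ _ 0 (le_refl _), Nat.zero_add]
        have hB := pv_foldB k.toNat (PySem.Chars.join [] (lis.map String.toList)) 0 0
        push_cast at hB
        rw [← hkK] at hB
        simp only [hB, hcnt]
        by_cases hfin : ((runsCount k.toNat 0 (PySem.Chars.join [] (lis.map String.toList)) : Nat) : Int) * k
            = ((lis.count "w" : Nat) : Int)
        · rw [if_pos hfin]
          simp [hfin]
        · rw [if_neg hfin]
          simp [hfin]
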